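-- pv_equiv track=rewrite | github.com/trulshj/AdventOfCode | 2022/python/day07.py | find_directory_sizes
-- ===== SOURCE A (Python) =====
-- from collections import defaultdict
-- from itertools import accumulate
--
-- def find_directory_sizes(data: list[str]):
--     current_path = []
--     directory_sizes = defaultdict(int)
--
--     for line in data:
--         match line.split():
--             case '$', 'cd', '/': current_path = ['/']
--             case '$', 'cd', '..': current_path.pop()
--             case '$', 'cd', target: current_path.append(target)
--             case '$', 'ls': pass
--             case 'dir', _: pass
--             case size, _:
--                 for path in accumulate(current_path):
--                     directory_sizes[path] += int(size)
--
--     return directory_sizes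
-- ===== SOURCE B (Python) =====
-- def find_directory_sizes(data: list[str]):
--     # Each file size is tallied once, in the deepest directory; a directory's
--     # subtree size is rolled up into its parent when the directory is left.
--     # A directory becomes a key the first time a file is listed inside it.
--     stack = []          # [full path, pending subtree size], innermost last
--     totals = {}
--
--     def pop_dir():
--         path, size = stack.pop()
--         if size:
--             totals[path] += size
--         if stack:
--             stack[-1][1] += size
--
--     for line in data:
--         match line.split():
--             case '$', 'cd', '/':
--                 while stack:
--                     pop_dir()
--                 stack.append(['/', 0])
--             case '$', 'cd', '..':
--                 pop_dir()
--             case '$', 'cd', target: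
--                 parent = stack[-1][0] if stack else ''
--                 stack.append([parent + target, 0])
--             case '$', 'ls': pass
--             case 'dir', _: pass
--             case size, _:
--                 if stack:
--                     stack[-1][1] += int(size)
--                     for path, _ in stack:
--                         totals.setdefault(path, 0)
--
--     while stack:
--         pop_dir()
--     return totals
-- ===== Notes on version B (the rewrite author's own statement) =====
-- stated objective: alternative
-- what changed: Instead of adding every file size to each ancestor prefix of the current path, B keeps a stack of (directory path, pending subtree size), adds each size once to the innermost directory, and rolls a directory's subtree size up into its parent and into the totals when that directory is left; Pre_ excludes only the inputs where A raises ('$ cd ..' with an empty path, or a non-integer size token on a file line inside a directory), where B raises too.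
import Mathlib
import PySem

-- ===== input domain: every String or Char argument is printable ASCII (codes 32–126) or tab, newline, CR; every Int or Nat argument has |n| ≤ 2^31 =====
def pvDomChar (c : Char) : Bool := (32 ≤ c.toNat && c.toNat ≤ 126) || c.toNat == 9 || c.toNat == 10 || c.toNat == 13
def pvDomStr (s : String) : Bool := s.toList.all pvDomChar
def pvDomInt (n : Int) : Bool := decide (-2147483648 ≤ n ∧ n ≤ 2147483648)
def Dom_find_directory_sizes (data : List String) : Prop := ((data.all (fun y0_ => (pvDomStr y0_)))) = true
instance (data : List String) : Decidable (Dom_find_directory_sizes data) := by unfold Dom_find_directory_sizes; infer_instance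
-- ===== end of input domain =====

-- B tallies each file size once in the deepest directory and rolls subtree sizes up into the
-- parent when a directory is left, instead of A's per-file update of every ancestor prefix
-- (objective: alternative, one size addition per file line).

-- ===== PORT A =====
-- Python str + on the two path strings, ported as code-point concatenation (exact)
def pvScat (a b : String) : String := String.ofList (a.toList ++ b.toList)

-- itertools.accumulate(current_path): running concatenations
def pvAccumFrom (a : String) : List String → List String
  | [] => [a]
  | x :: xs => a :: pvAccumFrom (pvScat a x) xs

def pvAccum : List String → List String
  | [] => []
  | x :: xs => pvAccumFrom x xs

def pvStepA (st : List String × PySem.Dict String Int) (line : String) :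
    List String × PySem.Dict String Int :=
  match PySem.Str.split₀ line with
  | [a, b, target] =>
      if a = "$" ∧ b = "cd" then
        if target = "/" then (["/"], st.2)
        -- current_path.pop(); Python raises IndexError on an empty path: excluded by Pre_
        else if target = ".." then (st.1.dropLast, st.2)
        else (st.1 ++ [target], st.2)
      else st
  | [size, name] =>
      if (size = "$" ∧ name = "ls") ∨ size = "dir" then st
      -- int(size): a ValueError (ofStr? = none) with a nonempty path is excluded by Pre_
      else (st.1, (pvAccum st.1).foldl
        (fun d p => d.modify p 0 (fun x => x + (PySem.Int.ofStr? size).getD 0)) st.2)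
  | _ => st

def find_directory_sizes (data : List String) : List (String × Int) :=
  ((data.foldl pvStepA ([], PySem.Dict.empty)).2).items

-- ===== PORT B =====
-- The Lean stack holds B's Python stack reversed (innermost directory first): list.append/pop
-- at the end of the Python list become cons/uncons here.

-- 'if size: totals[path] += size' (the key is always present when size ≠ 0)
def pvBump2 (t : PySem.Dict String Int) (p : String) (v : Int) : PySem.Dict String Int :=
  if v ≠ 0 then t.modify p 0 (fun x => x + v) else t

-- 'if stack: stack[-1][1] += size'
def pvAddTop : List (String × Int) → Int → List (String × Int)
  | [], _ => []
  | (q, u) :: r, s => (q, u + s) :: r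

-- needed by pvDrain's termination proof
lemma pvAddTop_length (l : List (String × Int)) (s : Int) : (pvAddTop l s).length = l.length := by
  cases l with
  | nil => rfl
  | cons e r => rcases e with ⟨q, u⟩; rfl

-- 'while stack: pop_dir()'
def pvDrain : List (String × Int) → PySem.Dict String Int → PySem.Dict String Int
  | [], t => t
  | (p, s) :: rest, t => pvDrain (pvAddTop rest s) (pvBump2 t p s)
termination_by st _ => st.length
decreasing_by simp [pvAddTop_length]

def pvStepB (st : List (String × Int) × PySem.Dict String Int) (line : String) :
    List (String × Int) × PySem.Dict String Int :=
  match PySem.Str.split₀ line with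
  | [a, b, target] =>
      if a = "$" ∧ b = "cd" then
        if target = "/" then ([("/", 0)], pvDrain st.1 st.2)
        else if target = ".." then
          match st.1 with
          -- pop_dir(): pop, fold the pending size into totals and into the parent's pending
          | (p, s) :: rest => (pvAddTop rest s, pvBump2 st.2 p s)
          -- stack.pop() raises IndexError in Python here: excluded by Pre_
          | [] => st
        else
          (((match st.1 with
             | e :: _ => pvScat e.1 target
             | [] => target), 0) :: st.1, st.2)
      else st
  | [size, name] =>
      if ¬(size = "$" ∧ name = "ls") ∧ size ≠ "dir" then
        match st.1 with
        | (p, s) :: rest =>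
            -- add the size once, to the deepest directory; setdefault every open directory
            (((p, s + (PySem.Int.ofStr? size).getD 0) :: rest),
             (((p, s + (PySem.Int.ofStr? size).getD 0) :: rest).reverse.foldl
               (fun t e => t.setdefault e.1 0) st.2))
        | [] => st
      else st
  | _ => st

def find_directory_sizes_alt (data : List String) : List (String × Int) :=
  (pvDrain (data.foldl pvStepB ([], PySem.Dict.empty)).1
           (data.foldl pvStepB ([], PySem.Dict.empty)).2).items

-- ===== PRECONDITION & SPEC =====
-- depth of the current path after each line; none once the Python would have raised
def pvPreStep (st : Option Nat) (line : String) : Option Nat :=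
  match st with
  | none => none
  | some dep =>
    match PySem.Str.split₀ line with
    | [a, b, target] =>
        if a = "$" ∧ b = "cd" then
          if target = "/" then some 1
          else if target = ".." then (if dep = 0 then none else some (dep - 1))
          else some (dep + 1)
        else some dep
    | [size, name] =>
        if (size = "$" ∧ name = "ls") ∨ size = "dir" then some dep
        else if dep = 0 then some dep
        else if (PySem.Int.ofStr? size).isSome then some dep else none
    | _ => some dep

-- Pre_ excludes exactly the inputs on which A raises: a '$ cd ..' issued with an empty
-- current path (IndexError from list.pop) and a two-token file line whose size token
-- int() rejects while the current path is nonempty (ValueError). B raises there too.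
def Pre_find_directory_sizes (data : List String) : Prop :=
  (data.foldl pvPreStep (some 0)).isSome = true

instance (data : List String) : Decidable (Pre_find_directory_sizes data) := by
  unfold Pre_find_directory_sizes; infer_instance

def pvWitness_find_directory_sizes : List String :=
  ["$ cd /", "$ ls", "dir a", "100 b.txt", "$ cd a", "7 c.txt", "$ cd ..", "3 d.txt"]

def Spec_find_directory_sizes (data : List String) (out : List (String × Int)) : Prop :=
  out = find_directory_sizes_alt data
instance (data : List String) (out : List (String × Int)) :
    Decidable (Spec_find_directory_sizes data out) := by
  unfold Spec_find_directory_sizes; infer_instance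

-- ===== CLAIM (what is proved, stated in full; the proofs are below) =====
def Claim_equal_find_directory_sizes : Prop :=
  ∀ (data : List String), Dom_find_directory_sizes data → Pre_find_directory_sizes data →
    Spec_find_directory_sizes data (find_directory_sizes data)

-- ===== LEMMAS AND PROOFS =====

-- 'if p in totals: totals[p] += v' — the shape A's defaultdict updates reduce to
def pvBump (t : PySem.Dict String Int) (p : String) (v : Int) : PySem.Dict String Int :=
  if t.contains p then t.modify p 0 (fun x => x + v) else t

-- flushing a top-first stack with a running carry — the common normal form of both programs
def pvFlushRev : List (String × Int) → Int → PySem.Dict String Int → PySem.Dict String Int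
  | [], _, t => t
  | (p, s) :: r, c, t => pvFlushRev r (c + s) (pvBump t p (c + s))

-- weight that pvFlushRev will eventually add to key q
def pvWt : List (String × Int) → Int → String → Int
  | [], _, _ => 0
  | (p, s) :: r, c, q => (if q = p then c + s else 0) + pvWt r (c + s) q

-- every pending subtotal whose cumulative value is nonzero sits under a registered key
def pvOk : List (String × Int) → Int → PySem.Dict String Int → Prop
  | [], _, _ => True
  | (p, s) :: r, c, t => ((c + s ≠ 0) → t.contains p = true) ∧ pvOk r (c + s) t

-- registering a list of keys (missing ones get value 0, appended in order)
def pvRegS (ps : List String) (t : PySem.Dict String Int) : PySem.Dict String Int :=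
  ps.foldl (fun t p => if t.contains p then t else t.insert p 0) t

def pvInv (path : List String) (d : PySem.Dict String Int)
    (stackR : List (String × Int)) (t : PySem.Dict String Int) : Prop :=
  stackR.reverse.map Prod.fst = pvAccum path ∧
  d = pvFlushRev stackR 0 t ∧
  pvOk stackR 0 t ∧
  t.keys.Nodup

-- ---- dictionary extensionality ----
lemma pvGetD_of_not_contains (t : PySem.Dict String Int) (q : String)
    (h : t.contains q = false) : t.getD q 0 = 0 := by
  simp only [PySem.Dict.getD, (PySem.Dict.get?_eq_none_iff_contains t q).mpr h, Option.getD_none]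

lemma pvDictExt (d d' : PySem.Dict String Int) (hn : d.keys.Nodup)
    (hk : d.keys = d'.keys) (hv : ∀ q, d.getD q 0 = d'.getD q 0) : d = d' := by
  apply PySem.Dict.ext
  rw [PySem.Dict.items_eq_map_keys d hn 0, PySem.Dict.items_eq_map_keys d' (hk ▸ hn) 0, hk]
  exact List.map_congr_left fun k _ => by rw [hv k]

-- ---- bump lemmas ----
lemma pvKeys_bump (t : PySem.Dict String Int) (p : String) (v : Int) :
    (pvBump t p v).keys = t.keys := by
  unfold pvBump
  split
  · rename_i hc
    rw [PySem.Dict.keys_modify, PySem.Dict.keys_insert_of_contains _ _ hc]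
  · rfl

lemma pvContains_bump (t : PySem.Dict String Int) (p q : String) (v : Int) :
    (pvBump t p v).contains q = t.contains q := by
  rw [PySem.Dict.contains_eq_decide_mem_keys, PySem.Dict.contains_eq_decide_mem_keys, pvKeys_bump]

lemma pvGetD_bump (t : PySem.Dict String Int) (p q : String) (v : Int) :
    (pvBump t p v).getD q 0 =
      t.getD q 0 + (if q = p ∧ t.contains p = true then v else 0) := by
  unfold pvBump
  split
  · rename_i hc
    rw [PySem.Dict.getD_modify]
    by_cases hq : q = p <;> simp [hq, hc]
  · rename_i hc
    simp only [Bool.not_eq_true] at hc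
    simp [hc]

lemma pvBump_zero (t : PySem.Dict String Int) (p : String) (hn : t.keys.Nodup) :
    pvBump t p 0 = t := by
  refine pvDictExt _ _ (by rw [pvKeys_bump]; exact hn) (pvKeys_bump t p 0) (fun q => ?_)
  rw [pvGetD_bump]
  split <;> simp

-- pvBump2 agrees with pvBump whenever a nonzero pending size implies a registered key
lemma pvBump2_eq_bump (t : PySem.Dict String Int) (p : String) (v : Int)
    (h : v ≠ 0 → t.contains p = true) (hn : t.keys.Nodup) : pvBump2 t p v = pvBump t p v := by
  by_cases hv : v = 0
  · subst hv
    rw [pvBump_zero _ _ hn]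
    simp [pvBump2]
  · rw [pvBump2, if_pos hv, pvBump, if_pos (h hv)]

-- ---- flush lemmas ----
lemma pvKeys_flushRev (r : List (String × Int)) (c : Int) (t : PySem.Dict String Int) :
    (pvFlushRev r c t).keys = t.keys := by
  induction r generalizing c t with
  | nil => rfl
  | cons e r ih =>
    obtain ⟨p, s⟩ := e
    simp only [pvFlushRev]
    rw [ih, pvKeys_bump]

lemma pvGetD_flushRev (r : List (String × Int)) (c : Int) (t : PySem.Dict String Int)
    (q : String) :
    (pvFlushRev r c t).getD q 0 =
      t.getD q 0 + (if t.contains q = true then pvWt r c q else 0) := by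
  induction r generalizing c t with
  | nil => simp [pvFlushRev, pvWt]
  | cons e r ih =>
    obtain ⟨p, s⟩ := e
    simp only [pvFlushRev, pvWt]
    rw [ih, pvGetD_bump, pvContains_bump]
    by_cases hq : q = p
    · subst hq
      by_cases hc : t.contains q = true <;> simp [hc, add_assoc]
    · by_cases hc : t.contains q = true <;> simp [hq, hc]

lemma pvFlushRev_addTop (l : List (String × Int)) (c : Int) (t : PySem.Dict String Int) :
    pvFlushRev (pvAddTop l c) 0 t = pvFlushRev l c t := by
  cases l with
  | nil => rfl
  | cons e r =>
    obtain ⟨p, s⟩ := e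
    simp only [pvAddTop, pvFlushRev]
    rw [zero_add, add_comm s c]

-- ---- weight lemmas ----
lemma pvWt_carry (r : List (String × Int)) (c x : Int) (q : String) :
    pvWt r (c + x) q = pvWt r c q + ((r.map Prod.fst).count q : Int) * x := by
  induction r generalizing c with
  | nil => simp [pvWt]
  | cons e r ih =>
    obtain ⟨p, s⟩ := e
    simp only [pvWt, List.map_cons, List.count_cons]
    rw [show c + x + s = c + s + x by ring, ih]
    by_cases hq : q = p
    · subst hq
      simp only [BEq.rfl, if_true]
      push_cast; ring
    · simp only [if_neg hq, beq_eq_false_iff_ne.mpr (fun h => hq h.symm)]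
      push_cast; ring

lemma pvWt_zero_of_not_contains (r : List (String × Int)) (c : Int)
    (t : PySem.Dict String Int) (q : String) (hok : pvOk r c t)
    (h : t.contains q = false) : pvWt r c q = 0 := by
  induction r generalizing c with
  | nil => simp [pvWt]
  | cons e r ih =>
    obtain ⟨p, s⟩ := e
    obtain ⟨h1, hok'⟩ := hok
    simp only [pvWt]
    rw [ih _ hok']
    by_cases hq : q = p
    · subst hq
      by_cases hz : c + s = 0
      · simp [hz]
      · rw [h1 hz] at h; exact absurd h (by simp)
    · simp [hq]

-- ---- pvOk lemmas ----
lemma pvOk_congr (r : List (String × Int)) (c : Int) (t t' : PySem.Dict String Int)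
    (h : ∀ q, t.contains q = t'.contains q) (hok : pvOk r c t) : pvOk r c t' := by
  induction r generalizing c with
  | nil => trivial
  | cons e r ih =>
    obtain ⟨p, s⟩ := e
    exact ⟨fun hz => (h p) ▸ hok.1 hz, ih _ hok.2⟩

lemma pvOk_of_contains (r : List (String × Int)) (c : Int) (t : PySem.Dict String Int)
    (h : ∀ e ∈ r, t.contains e.1 = true) : pvOk r c t := by
  induction r generalizing c with
  | nil => trivial
  | cons e r ih =>
    exact ⟨fun _ => h e (List.mem_cons_self), ih _ (fun e' he' => h e' (List.mem_cons_of_mem _ he'))⟩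

lemma pvOk_addTop (l : List (String × Int)) (c : Int) (t : PySem.Dict String Int)
    (h : pvOk l c t) : pvOk (pvAddTop l c) 0 t := by
  cases l with
  | nil => trivial
  | cons e r =>
    obtain ⟨p, s⟩ := e
    simp only [pvAddTop, pvOk] at h ⊢
    rw [zero_add, add_comm s c]
    exact h

-- ---- drain = flush ----
lemma pvDrain_eq_flush (st : List (String × Int)) (t : PySem.Dict String Int)
    (hok : pvOk st 0 t) (hn : t.keys.Nodup) : pvDrain st t = pvFlushRev st 0 t := by
  induction st, t using pvDrain.induct with
  | case1 t => simp [pvDrain, pvFlushRev]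
  | case2 p s rest t ih =>
    obtain ⟨h1, h2⟩ := hok
    rw [zero_add] at h1 h2
    have hb : pvBump2 t p s = pvBump t p s := pvBump2_eq_bump t p s h1 hn
    have hok' : pvOk (pvAddTop rest s) 0 (pvBump2 t p s) := by
      rw [hb]
      exact pvOk_addTop _ _ _ (pvOk_congr _ _ _ _ (fun q => (pvContains_bump t p q s).symm) h2)
    have hn' : (pvBump2 t p s).keys.Nodup := by rw [hb, pvKeys_bump]; exact hn
    rw [pvDrain, ih hok' hn', hb, pvFlushRev_addTop]
    simp only [pvFlushRev, zero_add]

-- ---- register lemmas ----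
lemma pvGetD_regS (ps : List String) (t : PySem.Dict String Int) (q : String) :
    (pvRegS ps t).getD q 0 = t.getD q 0 := by
  induction ps generalizing t with
  | nil => rfl
  | cons p ps ih =>
    simp only [pvRegS, List.foldl_cons]
    by_cases hcp : t.contains p = true
    · rw [if_pos hcp]
      exact ih t
    · have hf : t.contains p = false := by simpa using hcp
      rw [if_neg hcp]
      have step : (t.insert p 0).getD q 0 = t.getD q 0 := by
        by_cases hq : q = p
        · subst hq
          rw [PySem.Dict.getD_insert_self, pvGetD_of_not_contains t q hf]
        · exact PySem.Dict.getD_insert_of_ne _ _ _ hq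
      rw [show (List.foldl (fun t p => if t.contains p = true then t else t.insert p 0) (t.insert p 0) ps) = pvRegS ps (t.insert p 0) from rfl, ih, step]

lemma pvContains_regS (ps : List String) (t : PySem.Dict String Int) (q : String) :
    (pvRegS ps t).contains q = (t.contains q || decide (q ∈ ps)) := by
  induction ps generalizing t with
  | nil => simp [pvRegS]
  | cons p ps ih =>
    simp only [pvRegS, List.foldl_cons]
    by_cases hcp : t.contains p = true
    · rw [if_pos hcp,
        show (List.foldl (fun t p => if t.contains p = true then t else t.insert p 0) t ps) = pvRegS ps t from rfl, ih]
      by_cases hq : q = p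
      · subst hq; simp [hcp]
      · simp [hq, List.mem_cons]
    · rw [if_neg hcp,
        show (List.foldl (fun t p => if t.contains p = true then t else t.insert p 0) (t.insert p 0) ps) = pvRegS ps (t.insert p 0) from rfl, ih, PySem.Dict.contains_insert]
      by_cases hq : q = p
      · subst hq; simp [List.mem_cons]
      · simp only [beq_eq_false_iff_ne.mpr hq, Bool.false_or, List.mem_cons]
        simp [hq]

lemma pvNodup_regS (ps : List String) (t : PySem.Dict String Int)
    (hn : t.keys.Nodup) : (pvRegS ps t).keys.Nodup := by
  induction ps generalizing t with
  | nil => exact hn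
  | cons p ps ih =>
    simp only [pvRegS, List.foldl_cons]
    by_cases hcp : t.contains p = true
    · rw [if_pos hcp]; exact ih _ hn
    · rw [if_neg hcp]
      exact ih _ (PySem.Dict.nodup_keys_insert _ _ _ hn)

-- the port's setdefault fold over the stack is pvRegS over the path strings
lemma pvSetdefault_fold_eq_regS (es : List (String × Int)) (t : PySem.Dict String Int) :
    es.foldl (fun t e => t.setdefault e.1 0) t = pvRegS (es.map Prod.fst) t := by
  induction es generalizing t with
  | nil => rfl
  | cons e es ih =>
    simp only [List.foldl_cons, List.map_cons, pvRegS, List.foldl_cons]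
    by_cases hc : t.contains e.1 = true
    · rw [PySem.Dict.setdefault_of_contains t 0 hc, if_pos hc]
      exact ih t
    · have hf : t.contains e.1 = false := by simpa using hc
      rw [PySem.Dict.setdefault_of_not_contains t 0 hf, if_neg hc]
      exact ih _

-- ---- A-side fold lemmas ----
lemma pvKeys_addAll (ps : List String) (sz : Int) (d t : PySem.Dict String Int)
    (h : d.keys = t.keys) :
    (ps.foldl (fun d p => d.modify p 0 (fun x => x + sz)) d).keys = (pvRegS ps t).keys := by
  induction ps generalizing d t with
  | nil => exact h
  | cons p ps ih =>
    simp only [List.foldl_cons, pvRegS]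
    have hcd : d.contains p = t.contains p := by
      rw [PySem.Dict.contains_eq_decide_mem_keys, PySem.Dict.contains_eq_decide_mem_keys, h]
    by_cases hcp : t.contains p = true
    · rw [if_pos hcp]
      exact ih _ _ (by
        rw [PySem.Dict.keys_modify, PySem.Dict.keys_insert_of_contains _ _ (hcd ▸ hcp), h])
    · have hf : t.contains p = false := by simpa using hcp
      rw [if_neg hcp]
      exact ih _ _ (by
        rw [PySem.Dict.keys_modify, PySem.Dict.keys_insert_of_not_contains _ _ (hcd ▸ hf),
          PySem.Dict.keys_insert_of_not_contains _ _ hf, h])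

lemma pvGetD_addAll (ps : List String) (sz : Int) (d : PySem.Dict String Int) (q : String) :
    (ps.foldl (fun d p => d.modify p 0 (fun x => x + sz)) d).getD q 0
      = d.getD q 0 + (ps.count q : Int) * sz := by
  induction ps generalizing d with
  | nil => simp
  | cons p ps ih =>
    simp only [List.foldl_cons, List.count_cons]
    rw [ih, PySem.Dict.getD_modify]
    by_cases hq : q = p
    · subst hq
      simp only [BEq.rfl, if_true]
      push_cast; ring
    · simp only [if_neg hq, beq_eq_false_iff_ne.mpr (fun h => hq h.symm)]
      push_cast; ring

-- ---- accumulate lemmas ----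
lemma pvAccumFrom_ne_nil (a : String) (ys : List String) : pvAccumFrom a ys ≠ [] := by
  cases ys <;> simp [pvAccumFrom]

lemma pvAccum_dropLast (ys : List String) :
    pvAccum ys.dropLast = (pvAccum ys).dropLast := by
  have key : ∀ (ys : List String) (a : String),
      pvAccumFrom a ys.dropLast = (pvAccumFrom a ys).dropLast ∨ ys = [] := by
    intro ys
    induction ys with
    | nil => intro a; exact Or.inr rfl
    | cons z zs ih =>
      intro a
      refine Or.inl ?_
      cases zs with
      | nil => simp [pvAccumFrom]
      | cons w ws =>
        rw [List.dropLast_cons_of_ne_nil (by simp : (w :: ws) ≠ [])]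
        rw [show pvAccumFrom a (z :: (w :: ws).dropLast)
              = a :: pvAccumFrom (pvScat a z) ((w :: ws).dropLast) from rfl]
        rcases ih (pvScat a z) with hih | hih
        · rw [hih]
          rw [show pvAccumFrom a (z :: w :: ws) = a :: pvAccumFrom (pvScat a z) (w :: ws) from rfl]
          rw [List.dropLast_cons_of_ne_nil (pvAccumFrom_ne_nil _ _)]
        · exact absurd hih (by simp)
  cases ys with
  | nil => rfl
  | cons y ys =>
    cases ys with
    | nil => rfl
    | cons z zs =>
      rw [List.dropLast_cons_of_ne_nil (by simp : (z :: zs) ≠ [])]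
      simp only [pvAccum]
      rcases key (z :: zs) y with h | h
      · exact h
      · exact absurd h (by simp)

lemma pvAccumFrom_append (a x : String) (ys : List String) (l : String)
    (hl : (pvAccumFrom a ys).getLast? = some l) :
    pvAccumFrom a (ys ++ [x]) = pvAccumFrom a ys ++ [pvScat l x] := by
  induction ys generalizing a with
  | nil =>
    simp [pvAccumFrom] at hl ⊢
    subst hl; rfl
  | cons z zs ih =>
    simp only [pvAccumFrom, List.cons_append]
    simp only [pvAccumFrom] at hl
    rw [List.getLast?_cons, List.getLast?_eq_some_getLast (pvAccumFrom_ne_nil (pvScat a z) zs),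
      Option.getD_some] at hl
    rw [← List.getLast?_eq_some_getLast (pvAccumFrom_ne_nil (pvScat a z) zs)] at hl
    rw [ih _ hl]

lemma pvAccum_append (ys : List String) (x : String) :
    pvAccum (ys ++ [x]) = pvAccum ys ++
      [match (pvAccum ys).getLast? with | some l => pvScat l x | none => x] := by
  cases ys with
  | nil => rfl
  | cons y ys =>
    simp only [pvAccum, List.cons_append]
    have hne := pvAccumFrom_ne_nil y ys
    obtain ⟨l, hl⟩ := Option.isSome_iff_exists.mp (by
      rw [List.getLast?_isSome]; exact hne)
    rw [pvAccumFrom_append _ _ _ _ hl, hl]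

-- ---- the dictionary equality at a file line ----
lemma pvFile_core (rest : List (String × Int)) (p : String) (s sz : Int)
    (t : PySem.Dict String Int) (hn : t.keys.Nodup) (hok : pvOk ((p, s) :: rest) 0 t) :
    ((((p, s) :: rest).reverse.map Prod.fst).foldl
        (fun d q => d.modify q 0 (fun x => x + sz)) (pvFlushRev ((p, s) :: rest) 0 t))
      = pvFlushRev ((p, s + sz) :: rest) 0
          (pvRegS (((p, s) :: rest).reverse.map Prod.fst) t) := by
  set ps := ((p, s) :: rest).reverse.map Prod.fst with hps
  have hcount : ∀ q, (ps.count q : Int)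
      = ((rest.map Prod.fst).count q : Int) + (if q = p then 1 else 0) := by
    intro q
    rw [hps, List.map_reverse, List.count_reverse, List.map_cons, List.count_cons]
    by_cases hq : q = p
    · subst hq; simp
    · have h1 : (p == q) = false := beq_eq_false_iff_ne.mpr (fun h => hq h.symm)
      simp [hq, h1]
  have hWnew : ∀ q, pvWt ((p, s + sz) :: rest) 0 q
      = pvWt ((p, s) :: rest) 0 q + (ps.count q : Int) * sz := by
    intro q
    simp only [pvWt]
    rw [show (0 : Int) + (s + sz) = (0 + s) + sz by ring, pvWt_carry, hcount q]
    split_ifs with hq <;> ring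
  apply pvDictExt
  · rw [pvKeys_addAll _ sz _ t (pvKeys_flushRev _ _ _)]
    exact pvNodup_regS _ _ hn
  · rw [pvKeys_addAll _ sz _ t (pvKeys_flushRev _ _ _), pvKeys_flushRev]
  · intro q
    rw [pvGetD_addAll, pvGetD_flushRev, pvGetD_flushRev, pvGetD_regS, pvContains_regS, hWnew q]
    by_cases hc : t.contains q = true
    · simp only [hc, Bool.true_or, if_pos]
      ring
    · have hc0 : t.contains q = false := by simpa using hc
      have hgd : t.getD q 0 = 0 := pvGetD_of_not_contains t q hc0
      have hW0 : pvWt ((p, s) :: rest) 0 q = 0 :=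
        pvWt_zero_of_not_contains _ _ t q hok hc0
      by_cases hmem : q ∈ ps
      · simp [hc0, hmem, hgd, hW0]
      · rw [List.count_eq_zero_of_not_mem hmem]
        simp [hc0, hmem, hgd]

-- ---- the per-line step preserves the invariant ----
lemma pvStep_inv (path : List String) (d : PySem.Dict String Int)
    (stackR : List (String × Int)) (t : PySem.Dict String Int) (line : String)
    (h : pvInv path d stackR t) :
    pvInv (pvStepA (path, d) line).1 (pvStepA (path, d) line).2
      (pvStepB (stackR, t) line).1 (pvStepB (stackR, t) line).2 := by
  obtain ⟨hmap, hd, hok, hnd⟩ := h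
  simp only [pvStepA, pvStepB]
  cases hts : PySem.Str.split₀ line with
  | nil => exact ⟨hmap, hd, hok, hnd⟩
  | cons a ts1 =>
  cases ts1 with
  | nil => exact ⟨hmap, hd, hok, hnd⟩
  | cons b ts2 =>
  cases ts2 with
  | nil =>
    -- two tokens [a, b]
    by_cases hskip : (a = "$" ∧ b = "ls") ∨ a = "dir"
    · have hbs : ¬ (¬(a = "$" ∧ b = "ls") ∧ a ≠ "dir") := by tauto
      simp only [if_pos hskip, if_neg hbs]
      exact ⟨hmap, hd, hok, hnd⟩
    · have hbs : (¬(a = "$" ∧ b = "ls") ∧ a ≠ "dir") := by tauto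
      simp only [if_neg hskip, if_pos hbs]
      cases stackR with
      | nil =>
        -- empty stack: path is empty, accumulate is empty, both sides no-op
        have hacc : pvAccum path = [] := by simpa using hmap.symm
        simp only [hacc, List.foldl_nil]
        exact ⟨hmap, hd, hok, hnd⟩
      | cons e rest =>
        obtain ⟨p, s⟩ := e
        simp only
        set sz := (PySem.Int.ofStr? a).getD 0 with hsz
        have hmap' : ((p, s + sz) :: rest).reverse.map Prod.fst
            = ((p, s) :: rest).reverse.map Prod.fst := by simp
        rw [pvSetdefault_fold_eq_regS, hmap']
        refine ⟨by rw [hmap']; exact hmap, ?_, ?_, pvNodup_regS _ _ hnd⟩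
        · rw [hd, ← hmap]
          exact pvFile_core rest p s sz t hnd hok
        · apply pvOk_of_contains
          intro e he
          rw [pvContains_regS]
          have hm : e.1 ∈ ((p, s) :: rest).reverse.map Prod.fst := by
            rw [← hmap']
            exact List.mem_map_of_mem (List.mem_reverse.mpr he)
          have hdm : decide (e.1 ∈ ((p, s) :: rest).reverse.map Prod.fst) = true := by
            simpa using hm
          rw [hdm, Bool.or_true]
  | cons c ts3 =>
  cases ts3 with
  | cons d4 ts4 => exact ⟨hmap, hd, hok, hnd⟩
  | nil =>
    -- three tokens [a, b, c]
    by_cases hcd : a = "$" ∧ b = "cd"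
    · simp only [if_pos hcd]
      by_cases hroot : c = "/"
      · -- cd /
        simp only [if_pos hroot]
        have hdrain : pvDrain stackR t = pvFlushRev stackR 0 t := pvDrain_eq_flush _ _ hok hnd
        have hnd' : (pvDrain stackR t).keys.Nodup := by
          rw [hdrain, pvKeys_flushRev]; exact hnd
        refine ⟨rfl, ?_, ?_, hnd'⟩
        · show d = pvFlushRev [("/", 0)] 0 (pvDrain stackR t)
          simp only [pvFlushRev]
          rw [show (0 : Int) + 0 = 0 from rfl, pvBump_zero _ _ hnd', hdrain, hd]
        · exact ⟨fun h0 => absurd (by norm_num : (0 : Int) + 0 = 0) h0, trivial⟩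
      · simp only [if_neg hroot]
        by_cases hpop : c = ".."
        · -- cd ..
          simp only [if_pos hpop]
          cases stackR with
          | nil =>
            -- empty stack (Python raises; Pre_ excludes): both sides no-op
            have hpath : path = [] := by
              cases path with
              | nil => rfl
              | cons y ys => exact absurd hmap (by simp [pvAccum, pvAccumFrom_ne_nil])
            subst hpath
            exact ⟨hmap, hd, hok, hnd⟩
          | cons e rest =>
            obtain ⟨p, s⟩ := e
            simp only
            obtain ⟨h1, h2⟩ := hok
            rw [zero_add] at h1 h2
            have hb : pvBump2 t p s = pvBump t p s := pvBump2_eq_bump t p s h1 hnd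
            refine ⟨?_, ?_, ?_, by rw [hb, pvKeys_bump]; exact hnd⟩
            · have hrmap : rest.reverse.map Prod.fst = (pvAccum path).dropLast := by
                rw [← hmap]
                cases rest with
                | nil => simp
                | cons f r => simp
              have haddmap : (pvAddTop rest s).reverse.map Prod.fst
                  = rest.reverse.map Prod.fst := by
                cases rest with
                | nil => rfl
                | cons f r => obtain ⟨q, u⟩ := f; simp [pvAddTop]
              rw [haddmap, hrmap, pvAccum_dropLast]
            · rw [hb, pvFlushRev_addTop, hd]
              simp only [pvFlushRev, zero_add]
            · rw [hb]
              exact pvOk_addTop _ _ _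
                (pvOk_congr _ _ _ _ (fun q => (pvContains_bump t p q s).symm) h2)
        · -- cd target (push)
          simp only [if_neg hpop]
          cases stackR with
          | nil =>
            have hacc : pvAccum path = [] := by simpa using hmap.symm
            refine ⟨?_, ?_, ?_, hnd⟩
            · rw [pvAccum_append, hacc]
              simp
            · rw [hd]
              simp only [pvFlushRev]
              rw [show (0 : Int) + 0 = 0 from rfl, pvBump_zero _ _ hnd]
            · exact ⟨fun h0 => absurd (by norm_num : (0 : Int) + 0 = 0) h0, trivial⟩
          | cons e r =>
            obtain ⟨p0, s0⟩ := e
            have hlast : (pvAccum path).getLast? = some p0 := by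
              rw [← hmap]
              simp
            refine ⟨?_, ?_, ?_, hnd⟩
            · rw [pvAccum_append, hlast, ← hmap]
              simp
            · rw [hd]
              simp only [pvFlushRev]
              rw [show (0 : Int) + 0 = 0 from rfl, pvBump_zero _ _ hnd]
            · exact ⟨fun h0 => absurd (by norm_num : (0 : Int) + 0 = 0) h0, by
                rw [show (0 : Int) + 0 = 0 from rfl]; exact hok⟩
    · simp only [if_neg hcd]
      exact ⟨hmap, hd, hok, hnd⟩

lemma pvMain (data : List String) (path : List String) (d : PySem.Dict String Int)
    (stackR : List (String × Int)) (t : PySem.Dict String Int)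
    (h : pvInv path d stackR t) :
    pvInv (data.foldl pvStepA (path, d)).1 (data.foldl pvStepA (path, d)).2
      (data.foldl pvStepB (stackR, t)).1 (data.foldl pvStepB (stackR, t)).2 := by
  induction data generalizing path d stackR t with
  | nil => exact h
  | cons line rest ih =>
    simp only [List.foldl_cons]
    exact ih _ _ _ _ (pvStep_inv path d stackR t line h)

-- ===== VERDICT (by name: the statement is the Claim_ definition above) =====
theorem find_directory_sizes_spec : Claim_equal_find_directory_sizes := by
  intro data _ _
  unfold Spec_find_directory_sizes find_directory_sizes find_directory_sizes_alt
  have h := pvMain data [] PySem.Dict.empty [] PySem.Dict.empty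
    ⟨rfl, rfl, trivial, by simp [PySem.Dict.keys_empty]⟩
  obtain ⟨-, hd, hok, hnd⟩ := h
  rw [pvDrain_eq_flush _ _ hok hnd, ← hd]
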